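-- pv_equiv track=rewrite | github.com/Aubinx/TIPE-2021-Error-Correcting-Code | Programmes/TIPE.py | convertisseur_jpeg_vers_binaire_nb
-- ===== SOURCE A (Python) =====
-- def conv_binaire(n):#Convertit un entier naturel de [0,255] en binaire avec la division euclidienne
--     B=[]
--     N=n
--     for i in range(8):
--         r = N%2
--         N = N//2
--         B.append(r)
--     list.reverse(B)
--     return(B)
--
-- def convertisseur_jpeg_vers_binaire_nb(L): #Convertit des listes d'images en format jpeg en liste de listes binaires (un binaire entre 0 et 255 est codé par une liste de 0 et de 1 de longueur 8)
--     hau=len(L)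
--     lar=len(L[0])
--     M=[]
--     for i in range(hau):
--         M.append([])
--         for j in range(lar):
--             M[i].append([])
--             A0=int(L[i][j][0])
--             A1=int(L[i][j][1])
--             A2=int(L[i][j][2])
--             k=(A0+A1+A2)//3
--             M[i][j]=conv_binaire(k)
--     return(M)
-- ===== SOURCE B (Python) =====
-- def _bits8(k):
--     # closed-form bit extraction: (k >> s) & 1 == (k // 2**s) % 2 for every int
--     return [(k >> s) & 1 for s in range(7, -1, -1)]
--
-- def convertisseur_jpeg_vers_binaire_nb(L):
--     lar = len(L[0])
--     return [[_bits8((int(r[j][0]) + int(r[j][1]) + int(r[j][2])) // 3)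
--              for j in range(lar)]
--             for r in L]
-- ===== Notes on version B (the rewrite author's own statement) =====
-- stated objective: simpler
-- what changed: Per-pixel conversion becomes a closed-form shift-and-mask bit extraction instead of an 8-step remainder loop plus reverse, and the nested index-append-mutate construction becomes nested comprehensions over the rows.
-- outside the precondition, e.g. on convertisseur_jpeg_vers_binaire_nb([]): A raises IndexError, B raises IndexError; on convertisseur_jpeg_vers_binaire_nb([[[1, 2, 3]], [[]]]): A raises IndexError, B raises IndexError
import Mathlib
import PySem

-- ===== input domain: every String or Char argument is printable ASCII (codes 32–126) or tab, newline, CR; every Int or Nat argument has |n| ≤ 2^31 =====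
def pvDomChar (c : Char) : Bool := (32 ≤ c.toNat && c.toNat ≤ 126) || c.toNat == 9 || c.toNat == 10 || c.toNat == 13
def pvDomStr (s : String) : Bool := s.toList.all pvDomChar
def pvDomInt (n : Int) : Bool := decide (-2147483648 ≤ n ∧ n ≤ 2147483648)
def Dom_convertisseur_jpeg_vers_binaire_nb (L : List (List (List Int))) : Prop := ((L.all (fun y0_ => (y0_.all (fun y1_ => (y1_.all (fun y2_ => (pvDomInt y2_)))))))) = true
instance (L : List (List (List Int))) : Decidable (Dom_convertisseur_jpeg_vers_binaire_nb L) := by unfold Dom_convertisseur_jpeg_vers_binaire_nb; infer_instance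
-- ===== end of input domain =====

-- B replaces the per-pixel 8-step remainder loop + reverse by a closed-form
-- shift-and-mask bit extraction, and the index/append/mutate construction by
-- nested comprehensions (maps); same values, same cost class.

-- ===== PORT A =====
def conv_binaire (n : Int) : List Int :=
  -- B=[]; N=n; for i in range(8): r=N%2; N=N//2; B.append(r); B.reverse()
  let st := (PySem.List.pyRange 0 8 1).foldl
    (fun (st : List Int × Int) _ =>
      let r := PySem.Int.mod st.2 2
      let N := PySem.Int.floordiv st.2 2
      (st.1 ++ [r], N)) ([], n)
  st.1.reverse

def convertisseur_jpeg_vers_binaire_nb (L : List (List (List Int))) : List (List (List Int)) :=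
  let hau : Int := L.length
  let lar : Int := (PySem.List.pyGetD L 0 []).length
  (PySem.List.pyRange 0 hau 1).foldl
    (fun M i =>
      -- M.append([]); the inner 'M[i].append([]); M[i][j]=conv_binaire(k)'
      -- nets to appending conv_binaire(k) to the row under construction
      let inner := (PySem.List.pyRange 0 lar 1).foldl
        (fun acc j =>
          let p := PySem.List.pyGetD (PySem.List.pyGetD L i []) j []
          let A0 := PySem.List.pyGetD p 0 0
          let A1 := PySem.List.pyGetD p 1 0
          let A2 := PySem.List.pyGetD p 2 0
          let k := PySem.Int.floordiv (A0 + A1 + A2) 3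
          acc ++ [conv_binaire k]) []
      M ++ [inner]) []

-- ===== PORT B =====
def pvBits8 (k : Int) : List Int :=
  -- [(k >> s) & 1 for s in range(7,-1,-1)]; (k >> s) & 1 = k // 2**s % 2 exactly
  (PySem.List.pyRange 7 (-1) (-1)).map
    (fun s => PySem.Int.mod (PySem.Int.floordiv k (2 ^ s.toNat)) 2)

def convertisseur_jpeg_vers_binaire_nb_alt (L : List (List (List Int))) : List (List (List Int)) :=
  let lar : Int := (PySem.List.pyGetD L 0 []).length
  L.map (fun r =>
    (PySem.List.pyRange 0 lar 1).map (fun j =>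
      let p := PySem.List.pyGetD r j []
      pvBits8 (PySem.Int.floordiv
        ((PySem.List.pyGetD p 0 0) + (PySem.List.pyGetD p 1 0) + (PySem.List.pyGetD p 2 0)) 3)))

-- ===== PRECONDITION & SPEC =====
-- Pre_ excludes exactly the inputs on which Python A raises IndexError:
-- the empty image (len(L[0])), rows shorter than the first row, and pixels
-- with fewer than 3 channels among the first len(L[0]) pixels of a row.
def Pre_convertisseur_jpeg_vers_binaire_nb (L : List (List (List Int))) : Prop :=
  L ≠ [] ∧ ∀ row ∈ L, (L.headD []).length ≤ row.length ∧
    ∀ p ∈ row.take (L.headD []).length, 3 ≤ p.length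
instance (L : List (List (List Int))) : Decidable (Pre_convertisseur_jpeg_vers_binaire_nb L) := by
  unfold Pre_convertisseur_jpeg_vers_binaire_nb; infer_instance

def pvWitness_convertisseur_jpeg_vers_binaire_nb : List (List (List Int)) := [[[1, 2, 3]]]

def Spec_convertisseur_jpeg_vers_binaire_nb (L : List (List (List Int))) (out : List (List (List Int))) : Prop := out = convertisseur_jpeg_vers_binaire_nb_alt L
instance (L : List (List (List Int))) (out : List (List (List Int))) : Decidable (Spec_convertisseur_jpeg_vers_binaire_nb L out) := by unfold Spec_convertisseur_jpeg_vers_binaire_nb; infer_instance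

-- ===== CLAIM (what is proved, stated in full; the proofs are below) =====
def Claim_equal_convertisseur_jpeg_vers_binaire_nb : Prop := ∀ (L : List (List (List Int))), Dom_convertisseur_jpeg_vers_binaire_nb L → Pre_convertisseur_jpeg_vers_binaire_nb L → Spec_convertisseur_jpeg_vers_binaire_nb L (convertisseur_jpeg_vers_binaire_nb L)

-- ===== LEMMAS AND PROOFS =====

theorem conv_binaire_eq_pvBits8 (k : Int) : conv_binaire k = pvBits8 k := by
  have h1 : PySem.List.pyRange 0 8 1 = [0, 1, 2, 3, 4, 5, 6, 7] := by decide
  have h2 : PySem.List.pyRange 7 (-1) (-1) = [7, 6, 5, 4, 3, 2, 1, 0] := by decide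
  simp only [conv_binaire, pvBits8, h1, h2, List.foldl, List.map, List.reverse]
  norm_num [PySem.Int.floordiv_eq_ediv_of_pos, PySem.Int.mod_eq_emod_of_pos,
    Int.ediv_ediv_of_nonneg]
  simp only [show Int.toNat 7 = 7 from rfl, show Int.toNat 6 = 6 from rfl,
    show Int.toNat 5 = 5 from rfl, show Int.toNat 4 = 4 from rfl,
    show Int.toNat 3 = 3 from rfl, show Int.toNat 2 = 2 from rfl]
  norm_num

theorem ports_eq (L : List (List (List Int))) :
    convertisseur_jpeg_vers_binaire_nb L = convertisseur_jpeg_vers_binaire_nb_alt L := by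
  unfold convertisseur_jpeg_vers_binaire_nb convertisseur_jpeg_vers_binaire_nb_alt
  simp only [PySem.List.foldl_append_singleton_eq_map, conv_binaire_eq_pvBits8,
    List.nil_append]
  generalize ((PySem.List.pyGetD L 0 []).length : Int) = lar
  conv_rhs => rw [← PySem.List.map_pyGetD_pyRange_zero' L ([] : List (List Int))]
  simp only [List.map_map]
  rfl

-- ===== VERDICT (by name: the statement is the Claim_ definition above) =====
theorem convertisseur_jpeg_vers_binaire_nb_spec : Claim_equal_convertisseur_jpeg_vers_binaire_nb := by
  intro L _ _
  unfold Spec_convertisseur_jpeg_vers_binaire_nb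
  exact ports_eq L
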